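-- pv_equiv track=rewrite | github.com/DGomez1122/Portafolio | Tiene Ceros.py | AuxTieneCeros
-- ===== SOURCE A (Python) =====
-- def AuxTieneCeros(n):
--     if n==0:
--         return False
--     else:
--         if (n%10)==0:
--             return True
--         else:
--             return AuxTieneCeros(n//10)
-- ===== SOURCE B (Python) =====
-- # Alternative: collect the digits of abs(n) into a list in one stage, then test membership of 0.
-- def AuxTieneCeros(n):
--     digits = []
--     m = abs(n)
--     while m != 0:
--         digits.append(m % 10)
--         m //= 10
--     return 0 in digits
-- ===== Notes on version B (the rewrite author's own statement) =====
-- stated objective: alternative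
-- what changed: Instead of a signed early-return recursion testing each trailing digit, B collects the digits of abs(n) into a list in one stage and then tests membership of 0 in a second stage.
-- outside the precondition, e.g. on AuxTieneCeros(-91): A returns True, B returns False; on AuxTieneCeros(-1): A raises RecursionError, B returns False
import Mathlib
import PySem

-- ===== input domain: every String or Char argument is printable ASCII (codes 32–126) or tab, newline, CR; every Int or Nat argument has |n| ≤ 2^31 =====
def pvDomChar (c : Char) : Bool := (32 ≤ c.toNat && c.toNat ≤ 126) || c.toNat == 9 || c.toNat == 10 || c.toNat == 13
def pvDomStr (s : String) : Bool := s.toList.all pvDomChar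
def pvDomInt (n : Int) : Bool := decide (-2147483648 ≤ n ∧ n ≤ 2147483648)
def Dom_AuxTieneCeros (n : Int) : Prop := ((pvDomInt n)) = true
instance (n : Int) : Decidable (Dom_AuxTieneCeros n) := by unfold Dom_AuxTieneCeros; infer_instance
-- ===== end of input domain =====

-- B collects the digits of abs(n) into a list and then tests membership of 0, instead of
-- A's signed early-return recursion over n//10; equal on all nonnegative n and on negatives divisible by ten.


-- ===== PORT A =====
-- A's recursion n ↦ n//10 diverges for negative zero-free n (fixed point -1), so the
-- port carries fuel n.natAbs + 1, which is always sufficient on Pre_.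
def pvAFuel : Nat → Int → Bool
  | 0, _ => false
  | f + 1, n =>
    if n = 0 then false
    else if PySem.Int.mod n 10 = 0 then true
    else pvAFuel f (PySem.Int.floordiv n 10)

def AuxTieneCeros (n : Int) : Bool := pvAFuel (n.natAbs + 1) n

-- ===== PORT B =====
-- Stage 1 of Source B: the while-loop appending m % 10 and setting m //= 10 until m == 0.
-- m = abs(n) stays nonnegative, so Python's % and // on it coincide with Nat.mod and
-- Nat.div; the loop is ported as this well-founded recursion on m : Nat (exact on m ≥ 0).
def pvDigitList (m : Nat) : List Nat :=
  if h : m ≠ 0 then m % 10 :: pvDigitList (m / 10) else []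
decreasing_by exact Nat.div_lt_self (Nat.pos_of_ne_zero h) (by norm_num)

-- Stage 2 of Source B: '0 in digits' (membership of the int 0 in the digit list).
def AuxTieneCeros_alt (n : Int) : Bool := decide (0 ∈ pvDigitList n.natAbs)

-- ===== PRECONDITION & SPEC =====
-- Pre_ excludes negative n not divisible by ten: there A recurses toward the fixed
-- point -1 and raises RecursionError on most inputs; on the sparse remaining negatives
-- where some later iterate n//10 ends in the digit zero (e.g. -91) A returns True while
-- B, which reads the digits of abs(n), returns False — that set has no closed form
-- independent of A's algorithm.
def Pre_AuxTieneCeros (n : Int) : Prop := 0 ≤ n ∨ (10 : Int) ∣ n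
instance (n : Int) : Decidable (Pre_AuxTieneCeros n) := by unfold Pre_AuxTieneCeros; infer_instance
def pvWitness_AuxTieneCeros : Int := (105)

def Spec_AuxTieneCeros (n : Int) (out : Bool) : Prop := out = AuxTieneCeros_alt n
instance (n : Int) (out : Bool) : Decidable (Spec_AuxTieneCeros n out) := by unfold Spec_AuxTieneCeros; infer_instance

-- ===== CLAIM (what is proved, stated in full; the proofs are below) =====
def Claim_equal_AuxTieneCeros : Prop := ∀ (n : Int), Dom_AuxTieneCeros n → Pre_AuxTieneCeros n → Spec_AuxTieneCeros n (AuxTieneCeros n)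

-- ===== LEMMAS AND PROOFS =====

-- Python's % and // on a nonnegative int agree with Nat's mod and div (cast to Int).
lemma pvModCast (m : Nat) : PySem.Int.mod (m : Int) 10 = ((m % 10 : Nat) : Int) := by
  have : Int.fmod (m : Int) 10 = (m : Int) % 10 := by rw [Int.fmod_eq_emod]; simp
  simp only [PySem.Int.mod]
  omega

lemma pvDivCast (m : Nat) : PySem.Int.floordiv (m : Int) 10 = ((m / 10 : Nat) : Int) := by
  have : Int.fdiv (m : Int) 10 = (m : Int) / 10 :=
    Int.fdiv_eq_ediv_of_nonneg (m : Int) (by norm_num)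
  simp only [PySem.Int.floordiv]
  omega

-- On nonnegative inputs, A's fueled recursion computes membership of 0 in B's digit list.
lemma pvKey : ∀ (f m : Nat), m ≤ f →
    pvAFuel f (m : Int) = decide (0 ∈ pvDigitList m) := by
  intro f
  induction f with
  | zero =>
    intro m h
    have : m = 0 := by omega
    subst this
    simp [pvAFuel, pvDigitList]
  | succ f ih =>
    intro m h
    by_cases hz : m = 0
    · subst hz
      simp [pvAFuel, pvDigitList]
    · have hcast : (m : Int) ≠ 0 := by exact_mod_cast hz
      rw [pvDigitList, dif_pos hz]
      show (if (m : Int) = 0 then false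
            else if PySem.Int.mod (m : Int) 10 = 0 then true
            else pvAFuel f (PySem.Int.floordiv (m : Int) 10)) = _
      rw [if_neg hcast, pvModCast, pvDivCast]
      by_cases hd : m % 10 = 0
      · rw [if_pos (by exact_mod_cast hd)]
        simp [hd.symm]
      · rw [if_neg (by exact_mod_cast hd)]
        have hrec : m / 10 ≤ f := by
          have := Nat.div_lt_self (Nat.pos_of_ne_zero hz) (show 1 < 10 by norm_num)
          omega
        rw [ih (m / 10) hrec]
        have hcons : (0 ∈ m % 10 :: pvDigitList (m / 10)) ↔ 0 ∈ pvDigitList (m / 10) := by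
          simp [List.mem_cons, Ne.symm hd]
        simp [hcons]

-- ===== VERDICT (by name: the statement is the Claim_ definition above) =====
theorem AuxTieneCeros_spec : Claim_equal_AuxTieneCeros := by
  intro n _ hpre
  unfold Spec_AuxTieneCeros AuxTieneCeros AuxTieneCeros_alt
  by_cases h0 : 0 ≤ n
  · have hn : n = ((n.natAbs : Nat) : Int) := by omega
    rw [hn]
    exact pvKey (n.natAbs + 1) n.natAbs (by omega)
  · -- n < 0 and 10 ∣ n: A returns True at once; 0 heads B's digit list of |n|.
    have hd : (10 : Int) ∣ n := hpre.resolve_left h0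
    have hz : n ≠ 0 := by omega
    have hdn : n.natAbs % 10 = 0 := by
      have : (10 : Nat) ∣ n.natAbs := Int.natAbs_dvd_natAbs.mpr hd
      omega
    have hmod : PySem.Int.mod n 10 = 0 := by
      have h1 : Int.fmod n 10 = n % 10 := by rw [Int.fmod_eq_emod]; simp
      simp only [PySem.Int.mod]
      omega
    have hne : n.natAbs ≠ 0 := by omega
    have lhs : pvAFuel (n.natAbs + 1) n = true := by
      show (if n = 0 then false
            else if PySem.Int.mod n 10 = 0 then true
            else pvAFuel n.natAbs (PySem.Int.floordiv n 10)) = true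
      rw [if_neg hz, if_pos hmod]
    have rhs : decide (0 ∈ pvDigitList n.natAbs) = true := by
      rw [pvDigitList, dif_pos hne]
      simp [hdn.symm]
    rw [lhs, rhs]
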